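-- pv_equiv track=rewrite | github.com/archeearjun/BharatVote-DApp | build_testcase_mapping.py | find_line_range
-- ===== SOURCE A (Python) =====
-- def find_line_range(log_text: str, pattern: str):
--     if not log_text:
--         return None
--     lines = log_text.splitlines()
--     hits = [i + 1 for i, line in enumerate(lines) if pattern in line]
--     if not hits:
--         return None
--     return f"L{hits[0]}" if len(hits) == 1 else f"L{hits[0]}-L{hits[-1]}"
-- ===== SOURCE B (Python) =====
-- def find_line_range(log_text: str, pattern: str):
--     if not log_text:
--         return None
--     lines = log_text.splitlines()
--     first = None
--     for i, line in enumerate(lines, start=1):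
--         if pattern in line:
--             first = i
--             break
--     if first is None:
--         return None
--     last = first
--     j = len(lines)
--     for line in reversed(lines):
--         if pattern in line:
--             last = j
--             break
--         j -= 1
--     return f"L{first}" if first == last else f"L{first}-L{last}"
-- ===== Notes on version B (the rewrite author's own statement) =====
-- stated objective: alternative
-- what changed: Instead of collecting every matching line number into a list, B does an early-exit forward scan for the first match and a reverse scan for the last match, building no intermediate list.
import Mathlib
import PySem

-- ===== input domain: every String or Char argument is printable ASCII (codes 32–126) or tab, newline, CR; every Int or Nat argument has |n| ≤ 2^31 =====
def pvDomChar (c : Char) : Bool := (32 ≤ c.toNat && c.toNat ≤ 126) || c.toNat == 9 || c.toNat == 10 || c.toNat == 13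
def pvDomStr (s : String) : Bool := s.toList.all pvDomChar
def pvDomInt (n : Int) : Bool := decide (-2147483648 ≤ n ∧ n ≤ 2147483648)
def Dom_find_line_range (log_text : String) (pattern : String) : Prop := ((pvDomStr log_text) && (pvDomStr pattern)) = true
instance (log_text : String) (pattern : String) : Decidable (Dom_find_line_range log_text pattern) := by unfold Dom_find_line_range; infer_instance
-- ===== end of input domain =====

-- B replaces A's single list-collecting pass with an early-exit forward scan for the first match
-- and a reverse scan for the last match (objective: alternative decomposition, no list built).


-- ===== PORT A =====
def find_line_range (log_text : String) (pattern : String) : Option String :=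
  if log_text.toList = [] then none
  else
    let lines := PySem.Str.splitlines log_text
    -- [i + 1 for i, line in enumerate(lines) if pattern in line]
    let hits := ((PySem.List.enumerate lines).filter
                  (fun p => PySem.Str.isIn pattern p.2)).map (fun p => p.1 + 1)
    if hits = [] then none
    else if hits.length = 1 then some ("L" ++ PySem.Int.toStr (hits.headD 0))
    else some ("L" ++ PySem.Int.toStr (hits.headD 0) ++ "-L" ++ PySem.Int.toStr (hits.getLastD 0))

-- ===== PORT B =====
-- forward loop: `for i, line in enumerate(lines, start=1): if pattern in line: first = i; break`
def pvFirstHit (pattern : String) : List String → Int → Option Int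
  | [], _ => none
  | l :: rest, i => if PySem.Str.isIn pattern l then some i else pvFirstHit pattern rest (i + 1)

-- backward loop: `j = len(lines); for line in reversed(lines): if pattern in line: last = j; break; j -= 1`
def pvLastHit (pattern : String) : List String → Int → Option Int
  | [], _ => none
  | l :: rest, j => if PySem.Str.isIn pattern l then some j else pvLastHit pattern rest (j - 1)

def find_line_range_alt (log_text : String) (pattern : String) : Option String :=
  if log_text.toList = [] then none
  else
    let lines := PySem.Str.splitlines log_text
    match pvFirstHit pattern lines 1 with
    | none => none
    | some first =>
      let last := (pvLastHit pattern lines.reverse (lines.length : Int)).getD first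
      if first = last then some ("L" ++ PySem.Int.toStr first)
      else some ("L" ++ PySem.Int.toStr first ++ "-L" ++ PySem.Int.toStr last)

-- ===== PRECONDITION & SPEC =====
def Spec_find_line_range (log_text : String) (pattern : String) (out : Option String) : Prop := out = find_line_range_alt log_text pattern
instance (log_text : String) (pattern : String) (out : Option String) : Decidable (Spec_find_line_range log_text pattern out) := by unfold Spec_find_line_range; infer_instance

-- ===== CLAIM (what is proved, stated in full; the proofs are below) =====
def Claim_equal_find_line_range : Prop := ∀ (log_text : String) (pattern : String), Dom_find_line_range log_text pattern → Spec_find_line_range log_text pattern (find_line_range log_text pattern)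

-- ===== LEMMAS AND PROOFS =====

-- abbreviation used only in the proofs: A's hit list with numbering starting after s
def pvHits (pattern : String) (lines : List String) (s : Int) : List Int :=
  ((PySem.List.enumerate lines s).filter (fun p => PySem.Str.isIn pattern p.2)).map (fun p => p.1 + 1)

lemma pvFirstHit_eq (pattern : String) (lines : List String) (s : Int) :
    pvFirstHit pattern lines (s + 1) = (pvHits pattern lines s).head? := by
  induction lines generalizing s with
  | nil => simp [pvFirstHit, pvHits, PySem.List.enumerate_nil]
  | cons l rest ih =>
    by_cases h : PySem.Chars.isIn pattern.toList l.toList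
    · simp [pvFirstHit, pvHits, PySem.List.enumerate_cons, h]
    · simpa [pvFirstHit, pvHits, PySem.List.enumerate_cons, List.filter_cons, h] using ih (s + 1)

lemma pvLastHit_eq (pattern : String) (ys : List String) (s : Int) :
    pvLastHit pattern ys (s + ys.length) = (pvHits pattern ys.reverse s).getLast? := by
  induction ys generalizing s with
  | nil => simp [pvLastHit, pvHits, PySem.List.enumerate_nil]
  | cons l rest ih =>
    have harg : s + ((l :: rest).length : Int) = (s + rest.length) + 1 := by
      simp [List.length_cons]; ring
    rw [harg]
    by_cases h : PySem.Chars.isIn pattern.toList l.toList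
    · simp [pvLastHit, pvHits, h, List.reverse_cons, PySem.List.enumerate_append,
        List.filter_append, List.map_append, List.getLast?_append,
        PySem.List.enumerate_cons, PySem.List.enumerate_nil]
    · have harg2 : (s + (rest.length : Int)) + 1 - 1 = s + rest.length := by ring
      simp only [pvLastHit, h, Bool.false_eq_true, ite_false, harg2,
        PySem.Str.isIn]
      rw [ih s]
      simp [pvHits, List.reverse_cons, PySem.List.enumerate_append, List.filter_append,
        PySem.List.enumerate_cons, PySem.List.enumerate_nil, h]

lemma pvHits_pairwise (pattern : String) (lines : List String) (s : Int) :
    (pvHits pattern lines s).Pairwise (· < ·) := by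
  unfold pvHits
  have h1 : (PySem.List.enumerate lines s).Pairwise (fun p q => p.1 < q.1) :=
    PySem.List.pairwise_lt_enumerate lines s
  have h2 := h1.filter (fun p => PySem.Str.isIn pattern p.2)
  exact h2.map _ (fun a b hab => by omega)

-- ===== VERDICT (by name: the statement is the Claim_ definition above) =====
theorem find_line_range_spec : Claim_equal_find_line_range := by
  intro log_text pattern _
  unfold Spec_find_line_range find_line_range find_line_range_alt
  by_cases hempty : log_text.toList = []
  · simp [hempty]
  · simp only [hempty, if_false]
    set lines := PySem.Str.splitlines log_text with hlines
    have hfirst : pvFirstHit pattern lines 1 = (pvHits pattern lines 0).head? := by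
      have := pvFirstHit_eq pattern lines 0
      simpa using this
    have hlast : pvLastHit pattern lines.reverse ((lines.length : Int))
        = (pvHits pattern lines 0).getLast? := by
      have := pvLastHit_eq pattern lines.reverse 0
      simpa using this
    have hhits : ((PySem.List.enumerate lines).filter
        (fun p => PySem.Str.isIn pattern p.2)).map (fun p => p.1 + 1) = pvHits pattern lines 0 := rfl
    rw [hhits, hfirst, hlast]
    rcases hH : pvHits pattern lines 0 with _ | ⟨h, t⟩
    · simp
    · by_cases ht : t = []
      · simp [ht]
      · have hpw : (h :: t).Pairwise (· < ·) := hH ▸ pvHits_pairwise pattern lines 0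
        have hglmem : t.getLast ht ∈ t := List.getLast_mem ht
        have hlt : h < t.getLast ht := (List.pairwise_cons.mp hpw).1 _ hglmem
        have hgl2 : (h :: t).getLast? = some (t.getLast ht) := by
          rw [List.getLast?_cons, List.getLast?_eq_some_getLast ht]
          simp
        have hlen : (h :: t).length ≠ 1 := by simp [ht]
        simp only [List.head?_cons, hgl2, Option.getD_some, List.headD_cons]
        rw [if_neg (by simp), if_neg hlen, if_neg (by omega)]
        rw [List.getLastD_cons, List.getLastD_eq_getLast?, List.getLast?_eq_some_getLast ht]
        simp
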